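-- pv_equiv track=rewrite | github.com/Tayjsl97/EmoMusicTV | chord_metrics.py | getBar
-- ===== SOURCE A (Python) =====
-- DURATION={0:2, 1:4, 2:6, 3:8, 4:10, 5:12, 6:16, 7:18, 8:20, 9:22, 10:24, 11:30, 12:32, 13:36, 14:42, 15:44, 16:48, 17:54, 18:56, 19:60,
-- 20:64, 21:66, 22:68, 23:72, 24:78, 25:80, 26:84, 27:90, 28:92, 29:96, 30:102, 31:108, 32:120, 33:126, 34:132, 35:138, 36:144}
--
-- def getBar(melody):
--     barList=[]
--     durSum=0
--     bar_cnt=0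
--     for i in range(len(melody)):
--         if melody[i]==0:
--             if bar_cnt!=0:
--                 barList.append(durSum)
--             durSum=0
--             bar_cnt+=1
--         if melody[i]>61 and melody[i]<99:
--             durSum+=DURATION[melody[i]-62]
--     barList.append(durSum)
--     return barList
-- ===== SOURCE B (Python) =====
-- DURATION={0:2, 1:4, 2:6, 3:8, 4:10, 5:12, 6:16, 7:18, 8:20, 9:22, 10:24, 11:30, 12:32, 13:36, 14:42, 15:44, 16:48, 17:54, 18:56, 19:60,
-- 20:64, 21:66, 22:68, 23:72, 24:78, 25:80, 26:84, 27:90, 28:92, 29:96, 30:102, 31:108, 32:120, 33:126, 34:132, 35:138, 36:144}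
--
-- def getBar(melody):
--     # split into groups at each 0 (zeros removed)
--     groups = []
--     cur = []
--     for n in melody:
--         if n == 0:
--             groups.append(cur)
--             cur = []
--         else:
--             cur.append(n)
--     groups.append(cur)
--     # everything before the first 0 is discarded (when a 0 exists)
--     if len(groups) > 1:
--         groups = groups[1:]
--     return [sum(DURATION[n-62] for n in g if 61 < n < 99) for g in groups]
-- ===== Notes on version B (the rewrite author's own statement) =====
-- stated objective: simpler
-- what changed: Replaces A's single-pass barList/durSum/bar_cnt state machine with an explicit split-at-zeros-into-groups step followed by mapping each group to its filtered duration sum.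
import Mathlib
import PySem

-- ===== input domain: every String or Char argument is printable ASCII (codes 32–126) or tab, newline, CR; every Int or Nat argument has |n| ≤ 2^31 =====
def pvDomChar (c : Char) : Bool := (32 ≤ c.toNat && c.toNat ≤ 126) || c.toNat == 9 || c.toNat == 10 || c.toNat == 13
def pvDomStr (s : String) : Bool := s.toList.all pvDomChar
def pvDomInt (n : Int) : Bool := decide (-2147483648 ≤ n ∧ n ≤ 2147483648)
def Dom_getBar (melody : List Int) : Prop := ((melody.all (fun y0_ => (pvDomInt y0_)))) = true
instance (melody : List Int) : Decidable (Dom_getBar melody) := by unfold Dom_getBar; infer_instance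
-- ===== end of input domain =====

-- B replaces A's barList/durSum/bar_cnt state machine by split-at-zeros then map-to-sum (objective: simpler decomposition).


-- shared module-level constant DURATION (dict with keys 0..36, as in the Python module)
def DURATION : PySem.Dict Int Int := PySem.Dict.ofList
  [(0,2), (1,4), (2,6), (3,8), (4,10), (5,12), (6,16), (7,18), (8,20), (9,22), (10,24),
   (11,30), (12,32), (13,36), (14,42), (15,44), (16,48), (17,54), (18,56), (19,60),
   (20,64), (21,66), (22,68), (23,72), (24,78), (25,80), (26,84), (27,90), (28,92),
   (29,96), (30,102), (31,108), (32,120), (33,126), (34,132), (35,138), (36,144)]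

-- DURATION[k]; every access in either program is guarded by 61 < n < 99, so the key
-- n-62 ∈ [0,36] is always present and the default 0 is never returned.
def dur (n : Int) : Int := (PySem.Dict.get? DURATION (n - 62)).getD 0

-- ===== PORT A =====
-- state: (barList, durSum, bar_cnt)
def aStep (s : List Int × Int × Int) (x : Int) : List Int × Int × Int :=
  let s1 : List Int × Int × Int :=
    if x = 0 then
      ((if s.2.2 ≠ 0 then s.1 ++ [s.2.1] else s.1), 0, s.2.2 + 1)
    else s
  if x > 61 ∧ x < 99 then (s1.1, s1.2.1 + dur x, s1.2.2) else s1

def getBar (melody : List Int) : List Int :=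
  let s := melody.foldl aStep ([], 0, 0)
  s.1 ++ [s.2.1]

-- ===== PORT B =====
-- sum(DURATION[n-62] for n in g if 61 < n < 99)
def segSum (g : List Int) : Int :=
  (g.filter (fun n => 61 < n ∧ n < 99)).foldl (fun acc n => acc + dur n) 0

-- state: (groups, cur)
def bStep (s : List (List Int) × List Int) (n : Int) : List (List Int) × List Int :=
  if n = 0 then (s.1 ++ [s.2], []) else (s.1, s.2 ++ [n])

def getBar_alt (melody : List Int) : List Int :=
  let s := melody.foldl bStep ([], [])
  let groups := s.1 ++ [s.2]
  let groups := if groups.length > 1 then groups.tail else groups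
  groups.map segSum

-- ===== PRECONDITION & SPEC =====
def Spec_getBar (melody : List Int) (out : List Int) : Prop := out = getBar_alt melody
instance (melody : List Int) (out : List Int) : Decidable (Spec_getBar melody out) := by unfold Spec_getBar; infer_instance

-- ===== CLAIM (what is proved, stated in full; the proofs are below) =====
def Claim_equal_getBar : Prop := ∀ (melody : List Int), Dom_getBar melody → Spec_getBar melody (getBar melody)

-- ===== LEMMAS AND PROOFS =====

-- abstraction from B's state to A's state
def h (s : List (List Int) × List Int) : List Int × Int × Int :=
  ((s.1.map segSum).drop 1, segSum s.2, (s.1.length : Int))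

theorem segSum_append (g : List Int) (x : Int) :
    segSum (g ++ [x]) = segSum g + (if 61 < x ∧ x < 99 then dur x else 0) := by
  unfold segSum
  rw [List.filter_append]
  by_cases hx : 61 < x ∧ x < 99
  · simp [List.foldl_append, hx]
  · simp [hx]

theorem step_comm (s : List (List Int) × List Int) (x : Int) :
    aStep (h s) x = h (bStep s x) := by
  obtain ⟨gs, cur⟩ := s
  unfold aStep bStep h
  by_cases hx : x = 0
  · subst hx
    simp only [if_pos]
    cases gs with
    | nil => simp [segSum]
    | cons g gs' =>
      simp only [List.length_cons]
      have h2 : ((gs'.length : Int) + 1) ≠ 0 := by positivity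
      simp [h2, segSum, List.map_append]
  · simp only [if_neg hx]
    by_cases hr : x > 61 ∧ x < 99
    · simp [hr, segSum_append]
    · simp [hr, segSum_append]

theorem fold_comm (xs : List Int) (s : List (List Int) × List Int) :
    xs.foldl aStep (h s) = h (xs.foldl bStep s) := by
  induction xs generalizing s with
  | nil => rfl
  | cons x xs ih => simp [List.foldl_cons, step_comm, ih]

theorem final_eq (gs : List (List Int)) (cur : List Int) :
    (gs.map segSum).drop 1 ++ [segSum cur] =
      (if (gs ++ [cur]).length > 1 then (gs ++ [cur]).tail else gs ++ [cur]).map segSum := by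
  cases gs with
  | nil => simp
  | cons g gs' => simp [List.map_append]

-- ===== VERDICT (by name: the statement is the Claim_ definition above) =====
theorem getBar_spec : Claim_equal_getBar := by
  intro melody _
  unfold Spec_getBar getBar getBar_alt
  have h0 : (([], 0, 0) : List Int × Int × Int) = h ([], []) := by
    simp [h, segSum]
  rw [h0, fold_comm]
  exact final_eq _ _
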